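-- pv_equiv track=rewrite | github.com/purpledancingfrogs/aimo3_competition_only | solver_modules/nt_mod.py | carries_in_base_p
-- ===== SOURCE A (Python) =====
-- def carries_in_base_p(n: int, k: int, p: int) -> int:
--     # Kummer: v_p(C(n,k)) equals number of carries when adding k and n-k in base p
--     n = int(n); k = int(k); p = int(p)
--     if k < 0 or k > n:
--         return 0
--     a = k
--     b = n - k
--     carries = 0
--     carry = 0
--     while a > 0 or b > 0 or carry:
--         da = a % p
--         db = b % p
--         a //= p
--         b //= p
--         if da + db + carry >= p:
--             carries += 1
--             carry = 1
--         else: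
--             carry = 0
--     return carries
-- ===== SOURCE B (Python) =====
-- def _digit_sum(x: int, p: int) -> int:
--     s = 0
--     while x > 0:
--         s += x % p
--         x //= p
--     return s
--
-- def carries_in_base_p(n: int, k: int, p: int) -> int:
--     # Kummer digit-sum form: carries = (s_p(k) + s_p(n-k) - s_p(n)) / (p - 1)
--     n = int(n); k = int(k); p = int(p)
--     if k < 0 or k > n:
--         return 0
--     return (_digit_sum(k, p) + _digit_sum(n - k, p) - _digit_sum(n, p)) // (p - 1)
-- ===== Notes on version B (the rewrite author's own statement) =====
-- stated objective: simpler
-- what changed: Replaces A's joint carry-propagation loop over both addends with three independent base-p digit sums combined by Legendre's closed form (s_p(k)+s_p(n-k)-s_p(n))//(p-1).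
-- outside the precondition, e.g. on carries_in_base_p(0, 0, 1): A returns 0, B raises ZeroDivisionError
import Mathlib
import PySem

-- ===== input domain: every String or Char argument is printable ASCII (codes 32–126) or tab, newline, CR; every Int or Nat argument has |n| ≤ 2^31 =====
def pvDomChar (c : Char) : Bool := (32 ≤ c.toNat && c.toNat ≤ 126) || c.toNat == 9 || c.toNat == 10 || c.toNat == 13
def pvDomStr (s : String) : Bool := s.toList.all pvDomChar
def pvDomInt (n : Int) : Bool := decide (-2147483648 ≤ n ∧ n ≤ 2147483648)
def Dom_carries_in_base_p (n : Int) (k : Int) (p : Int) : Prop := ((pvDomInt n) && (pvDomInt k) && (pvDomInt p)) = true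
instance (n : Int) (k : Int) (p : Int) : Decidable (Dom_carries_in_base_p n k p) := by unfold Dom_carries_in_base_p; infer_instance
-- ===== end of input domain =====

-- B replaces A's joint carry-propagation loop by three independent base-p digit sums
-- combined with Legendre's closed form (s_p(k)+s_p(n-k)-s_p(n)) // (p-1); objective: simpler.

-- ===== PORT A =====
-- A's while loop; fuel bounds the iterations (strictly more than ever needed when p ≥ 2,
-- i.e. inside Pre_; fuel exhaustion is unreachable there).
def pvCarryLoop (p : Int) : Nat → Int → Int → Int → Int → Int
  | 0, _, _, _, acc => acc
  | f + 1, a, b, carry, acc =>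
    if a > 0 ∨ b > 0 ∨ carry ≠ 0 then
      let da := PySem.Int.mod a p
      let db := PySem.Int.mod b p
      let a' := PySem.Int.floordiv a p
      let b' := PySem.Int.floordiv b p
      if da + db + carry ≥ p then pvCarryLoop p f a' b' 1 (acc + 1)
      else pvCarryLoop p f a' b' 0 acc
    else acc

def carries_in_base_p (n : Int) (k : Int) (p : Int) : Int :=
  if k < 0 ∨ k > n then 0
  else pvCarryLoop p (k.natAbs + (n - k).natAbs + 2) k (n - k) 0 0

-- ===== PORT B =====
-- B's _digit_sum while loop; fuel strictly exceeds the iteration count when p ≥ 2.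
def pvDigitSumLoop (p : Int) : Nat → Int → Int → Int
  | 0, _, s => s
  | f + 1, x, s =>
    if x > 0 then pvDigitSumLoop p f (PySem.Int.floordiv x p) (s + PySem.Int.mod x p)
    else s

def pvDigitSum (x : Int) (p : Int) : Int := pvDigitSumLoop p (x.natAbs + 1) x 0

def carries_in_base_p_alt (n : Int) (k : Int) (p : Int) : Int :=
  if k < 0 ∨ k > n then 0
  else PySem.Int.floordiv (pvDigitSum k p + pvDigitSum (n - k) p - pvDigitSum n p) (p - 1)

-- ===== PRECONDITION & SPEC =====
-- Pre_ excludes p ≤ 1 with 0 ≤ k ≤ n (keeping the trivial n = k = 0 with p ≠ 1): there A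
-- raises ZeroDivisionError (p = 0) or loops forever (p = 1 or p < 0 with n > 0), except the
-- degenerate (0, 0, 1) where A returns 0 but B's formula divides by p - 1 = 0 and raises.
def Pre_carries_in_base_p (n : Int) (k : Int) (p : Int) : Prop :=
  2 ≤ p ∨ k < 0 ∨ n < k ∨ (n = 0 ∧ k = 0 ∧ p ≠ 1)
instance (n : Int) (k : Int) (p : Int) : Decidable (Pre_carries_in_base_p n k p) := by
  unfold Pre_carries_in_base_p; infer_instance

def pvWitness_carries_in_base_p : Int × Int × Int := (10, 3, 2)

def Spec_carries_in_base_p (n : Int) (k : Int) (p : Int) (out : Int) : Prop := out = carries_in_base_p_alt n k p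
instance (n : Int) (k : Int) (p : Int) (out : Int) : Decidable (Spec_carries_in_base_p n k p out) := by unfold Spec_carries_in_base_p; infer_instance

-- ===== CLAIM (what is proved, stated in full; the proofs are below) =====
def Claim_equal_carries_in_base_p : Prop := ∀ (n : Int) (k : Int) (p : Int), Dom_carries_in_base_p n k p → Pre_carries_in_base_p n k p → Spec_carries_in_base_p n k p (carries_in_base_p n k p)

-- ===== LEMMAS AND PROOFS =====

-- digit-sum loop: the accumulator splits off
theorem pvDS_acc (p : Int) (f : Nat) : ∀ (x s : Int),
    pvDigitSumLoop p f x s = s + pvDigitSumLoop p f x 0 := by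
  induction f with
  | zero => intro x s; simp [pvDigitSumLoop]
  | succ f ih =>
    intro x s
    simp only [pvDigitSumLoop]
    by_cases h : x > 0
    · simp only [if_pos h]
      rw [ih _ (s + PySem.Int.mod x p), ih _ (0 + PySem.Int.mod x p)]
      ring
    · simp [if_neg h]

theorem pvDS_zero (p : Int) (f : Nat) (s : Int) : pvDigitSumLoop p f 0 s = s := by
  cases f <;> simp [pvDigitSumLoop]

-- one unfolding step, valid for every 0 ≤ x when p ≥ 2
theorem pvDS_step (p : Int) (hp : 2 ≤ p) (f : Nat) (x : Int) (hx : 0 ≤ x) :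
    pvDigitSumLoop p (f + 1) x 0 =
      PySem.Int.mod x p + pvDigitSumLoop p f (PySem.Int.floordiv x p) 0 := by
  by_cases h : x > 0
  · simp only [pvDigitSumLoop, if_pos h]
    rw [pvDS_acc]; ring
  · have hx0 : x = 0 := by omega
    subst hx0
    simp [pvDigitSumLoop, PySem.Int.mod_eq_emod_of_pos (show (0:Int) < p by omega),
      PySem.Int.floordiv_eq_ediv_of_pos (show (0:Int) < p by omega), pvDS_zero]

-- the digit sum does not depend on the fuel once the fuel is large enough
theorem pvDS_fuel (p : Int) (hp : 2 ≤ p) : ∀ (f : Nat) (x : Int) (g : Nat),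
    0 ≤ x → x.natAbs < f → x.natAbs < g →
    pvDigitSumLoop p f x 0 = pvDigitSumLoop p g x 0 := by
  intro f
  induction f with
  | zero => intro x g hx hf; omega
  | succ f ih =>
    intro x g hx hf hg
    obtain ⟨g', rfl⟩ : ∃ g', g = g' + 1 := ⟨g - 1, by omega⟩
    by_cases h : x > 0
    · have hppos : (0:Int) < p := by omega
      rw [pvDS_step p hp f x hx, pvDS_step p hp g' x hx]
      have hdlt : PySem.Int.floordiv x p < x := by
        rw [PySem.Int.floordiv_eq_ediv_of_pos hppos, Int.ediv_lt_iff_lt_mul hppos]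
        nlinarith
      have hdge : 0 ≤ PySem.Int.floordiv x p := by
        rw [PySem.Int.floordiv_eq_ediv_of_pos hppos]
        exact Int.ediv_nonneg hx (by omega)
      rw [ih (PySem.Int.floordiv x p) g' hdge (by omega) (by omega)]
    · have hx0 : x = 0 := by omega
      subst hx0; rw [pvDS_zero, pvDS_zero]

-- carry loop: the accumulator splits off
theorem pvCL_acc (p : Int) (f : Nat) : ∀ (a b c acc : Int),
    pvCarryLoop p f a b c acc = acc + pvCarryLoop p f a b c 0 := by
  induction f with
  | zero => intro a b c acc; simp [pvCarryLoop]
  | succ f ih =>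
    intro a b c acc
    simp only [pvCarryLoop]
    by_cases h : a > 0 ∨ b > 0 ∨ c ≠ 0
    · simp only [if_pos h]
      by_cases h2 : PySem.Int.mod a p + PySem.Int.mod b p + c ≥ p
      · simp only [if_pos h2]
        rw [ih _ _ _ (acc + 1), ih _ _ _ (0 + 1)]; ring
      · simp only [if_neg h2]; exact ih _ _ _ acc
    · simp [if_neg h]

theorem pvCL_zero (p : Int) (f : Nat) (acc : Int) : pvCarryLoop p f 0 0 0 acc = acc := by
  cases f <;> simp [pvCarryLoop]

-- main invariant: (p-1) · (number of carries) = s_p(a) + s_p(b) + c − s_p(a+b+c)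
theorem pvMain (p : Int) (hp : 2 ≤ p) : ∀ (f : Nat) (a b c : Int),
    0 ≤ a → 0 ≤ b → (c = 0 ∨ c = 1) → a.natAbs + b.natAbs + 1 < f →
    (p - 1) * pvCarryLoop p f a b c 0 =
      pvDigitSumLoop p f a 0 + pvDigitSumLoop p f b 0 + c - pvDigitSumLoop p f (a + b + c) 0 := by
  have hppos : (0:Int) < p := by omega
  intro f
  induction f with
  | zero => intro a b c _ _ _ hf; omega
  | succ f ih =>
    intro a b c ha hb hc hf
    by_cases hcond : a > 0 ∨ b > 0 ∨ c ≠ 0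
    · -- loop body runs
      set da := PySem.Int.mod a p with hda
      set db := PySem.Int.mod b p with hdb
      set a' := PySem.Int.floordiv a p with ha'
      set b' := PySem.Int.floordiv b p with hb'
      have hdab : 0 ≤ da ∧ da < p ∧ 0 ≤ db ∧ db < p :=
        ⟨PySem.Int.mod_nonneg a hppos, PySem.Int.mod_lt a hppos,
         PySem.Int.mod_nonneg b hppos, PySem.Int.mod_lt b hppos⟩
      have ha'e : a = p * a' + da := by
        rw [hda, ha', PySem.Int.floordiv_eq_ediv_of_pos hppos,
          PySem.Int.mod_eq_emod_of_pos hppos]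
        exact (Int.mul_ediv_add_emod a p).symm
      have hb'e : b = p * b' + db := by
        rw [hdb, hb', PySem.Int.floordiv_eq_ediv_of_pos hppos,
          PySem.Int.mod_eq_emod_of_pos hppos]
        exact (Int.mul_ediv_add_emod b p).symm
      have ha'ge : 0 ≤ a' := by
        rw [ha', PySem.Int.floordiv_eq_ediv_of_pos hppos]; exact Int.ediv_nonneg ha (by omega)
      have hb'ge : 0 ≤ b' := by
        rw [hb', PySem.Int.floordiv_eq_ediv_of_pos hppos]; exact Int.ediv_nonneg hb (by omega)
      have hSa := pvDS_step p hp f a ha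
      have hSb := pvDS_step p hp f b hb
      rw [← hda, ← ha'] at hSa
      rw [← hdb, ← hb'] at hSb
      have habcge : 0 ≤ a + b + c := by rcases hc with rfl | rfl <;> omega
      have hSab0 := pvDS_step p hp f (a + b + c) habcge
      -- fuel bookkeeping, needed whenever a > 0 or b > 0
      have hfuel : a > 0 ∨ b > 0 → a'.natAbs + b'.natAbs + 1 < f := by
        intro hab
        have h1 : a'.natAbs ≤ a.natAbs := by
          have : a' ≤ a := by nlinarith [hdab.1]
          omega
        have h2 : b'.natAbs ≤ b.natAbs := by
          have : b' ≤ b := by nlinarith [hdab.2.2.1]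
          omega
        rcases hab with hA | hB
        · have : a' < a := by
            rw [ha', PySem.Int.floordiv_eq_ediv_of_pos hppos, Int.ediv_lt_iff_lt_mul hppos]
            nlinarith
          omega
        · have : b' < b := by
            rw [hb', PySem.Int.floordiv_eq_ediv_of_pos hppos, Int.ediv_lt_iff_lt_mul hppos]
            nlinarith
          omega
      by_cases hs : da + db + c ≥ p
      · -- a carry is produced at this digit
        have hmod : PySem.Int.mod (a + b + c) p = da + db + c - p := by
          have habc : a + b + c = (da + db + c - p) + p * (a' + b' + 1) := by
            rw [ha'e, hb'e]; ring
          rw [PySem.Int.mod_eq_emod_of_pos hppos, habc, Int.add_mul_emod_self_left,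
            Int.emod_eq_of_lt (by omega) (by omega)]
        have hdiv : PySem.Int.floordiv (a + b + c) p = a' + b' + 1 := by
          have habc : a + b + c = (da + db + c - p) + p * (a' + b' + 1) := by
            rw [ha'e, hb'e]; ring
          rw [PySem.Int.floordiv_eq_ediv_of_pos hppos, habc,
            Int.add_mul_ediv_left _ _ (show p ≠ 0 by omega),
            Int.ediv_eq_zero_of_lt (by omega) (by omega), zero_add]
        have hloop : pvCarryLoop p (f + 1) a b c 0 = 1 + pvCarryLoop p f a' b' 1 0 := by
          simp only [pvCarryLoop, if_pos hcond, ← hda, ← hdb, ← ha', ← hb', if_pos hs]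
          rw [pvCL_acc]; ring
        have hab : a > 0 ∨ b > 0 := by
          by_contra hno
          have ha0 : a = 0 := by omega
          have hb0 : b = 0 := by omega
          have hda0 : da = 0 := by
            rw [hda, ha0, PySem.Int.mod_eq_emod_of_pos hppos]; simp
          have hdb0 : db = 0 := by
            rw [hdb, hb0, PySem.Int.mod_eq_emod_of_pos hppos]; simp
          omega
        have hih := ih a' b' 1 ha'ge hb'ge (Or.inr rfl) (hfuel hab)
        rw [hloop, hSa, hSb, hSab0, hmod, hdiv]
        linarith [hih]
      · -- no carry at this digit
        have hmod : PySem.Int.mod (a + b + c) p = da + db + c := by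
          have habc : a + b + c = (da + db + c) + p * (a' + b') := by
            rw [ha'e, hb'e]; ring
          rw [PySem.Int.mod_eq_emod_of_pos hppos, habc, Int.add_mul_emod_self_left,
            Int.emod_eq_of_lt (by omega) (by omega)]
        have hdiv : PySem.Int.floordiv (a + b + c) p = a' + b' := by
          have habc : a + b + c = (da + db + c) + p * (a' + b') := by
            rw [ha'e, hb'e]; ring
          rw [PySem.Int.floordiv_eq_ediv_of_pos hppos, habc,
            Int.add_mul_ediv_left _ _ (show p ≠ 0 by omega),
            Int.ediv_eq_zero_of_lt (by omega) (by omega), zero_add]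
        have hloop : pvCarryLoop p (f + 1) a b c 0 = pvCarryLoop p f a' b' 0 0 := by
          simp only [pvCarryLoop, if_pos hcond, ← hda, ← hdb, ← ha', ← hb', if_neg hs]
        by_cases hab : a > 0 ∨ b > 0
        · have hih := ih a' b' 0 ha'ge hb'ge (Or.inl rfl) (hfuel hab)
          simp only [add_zero] at hih
          rw [hloop, hSa, hSb, hSab0, hmod, hdiv]
          linarith [hih]
        · -- terminal step: a = b = 0 and c = 1, the carry dies out
          have ha0 : a = 0 := by omega
          have hb0 : b = 0 := by omega
          have hc1 : c = 1 := by
            rcases hc with rfl | rfl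
            · exact absurd hcond (by simp [ha0, hb0])
            · rfl
          have ha'0 : a' = 0 := by
            rw [ha', ha0, PySem.Int.floordiv_eq_ediv_of_pos hppos]; simp
          have hb'0 : b' = 0 := by
            rw [hb', hb0, PySem.Int.floordiv_eq_ediv_of_pos hppos]; simp
          have hda0 : da = 0 := by
            rw [hda, ha0, PySem.Int.mod_eq_emod_of_pos hppos]; simp
          have hdb0 : db = 0 := by
            rw [hdb, hb0, PySem.Int.mod_eq_emod_of_pos hppos]; simp
          rw [hloop, hSa, hSb, hSab0, hmod, hdiv, ha'0, hb'0, hda0, hdb0, hc1]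
          norm_num [pvCL_zero, pvDS_zero]
    · -- loop never runs: a = b = c = 0
      have ha0 : a = 0 := by omega
      have hb0 : b = 0 := by omega
      have hc0 : c = 0 := by
        rcases hc with rfl | rfl
        · rfl
        · exact absurd (Or.inr (Or.inr (by norm_num))) hcond
      subst ha0; subst hb0; subst hc0
      norm_num [pvCL_zero, pvDS_zero]

-- ===== VERDICT (by name: the statement is the Claim_ definition above) =====
theorem carries_in_base_p_spec : Claim_equal_carries_in_base_p := by
  intro n k p _ hpre
  unfold Spec_carries_in_base_p carries_in_base_p carries_in_base_p_alt
  by_cases hk : k < 0 ∨ k > n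
  · simp [if_pos hk]
  · simp only [if_neg hk]
    have hk0 : 0 ≤ k := by omega
    have hkn : k ≤ n := by omega
    rcases hpre with hp | h | h | ⟨hn0, hk0', hp1⟩
    · -- main case: p ≥ 2
      have hppos : (0:Int) < p - 1 := by omega
      have hnk : 0 ≤ n - k := by omega
      have hf : k.natAbs + (n - k).natAbs + 1 < k.natAbs + (n - k).natAbs + 2 := by omega
      have hmain := pvMain p hp (k.natAbs + (n - k).natAbs + 2) k (n - k) 0 hk0 hnk
        (Or.inl rfl) hf
      have hsum : k + (n - k) + 0 = n := by ring
      rw [hsum, add_zero] at hmain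
      set F := k.natAbs + (n - k).natAbs + 2 with hF
      unfold pvDigitSum
      rw [pvDS_fuel p hp (k.natAbs + 1) k F hk0 (by omega) (by omega),
        pvDS_fuel p hp ((n - k).natAbs + 1) (n - k) F hnk (by omega) (by omega),
        pvDS_fuel p hp (n.natAbs + 1) n F (by omega) (by omega) (by omega),
        ← hmain, PySem.Int.floordiv_eq_ediv_of_pos hppos,
        Int.mul_ediv_cancel_left _ (by omega)]
    · omega
    · omega
    · -- degenerate n = k = 0, p ≠ 1 (p may be ≤ 1 here)
      subst hn0; subst hk0'
      norm_num [pvCL_zero, pvDigitSum, pvDigitSumLoop, PySem.Int.floordiv]
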